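-- pv_equiv track=rewrite | github.com/UlrichBerntien/Codewars-Katas | 7_kyu/Negative_Connotation.py | connotation
-- ===== SOURCE A (Python) =====
-- def connotation(strng: str) -> bool:
--     take = True
--     sum = 0
--     for c in strng:
--         if c.isspace():
--             take = True
--         elif take:
--             sum += 1 if c.lower() < "n" else -1
--             take = False
--     return sum >= 0
-- ===== SOURCE B (Python) =====
-- def connotation(strng: str) -> bool:
--     return sum(1 if w[0].lower() < "n" else -1 for w in strng.split()) >= 0
-- ===== Notes on version B (the rewrite author's own statement) =====
-- stated objective: simpler
-- what changed: Replaces the character-by-character state machine with a boundary flag by a one-line split()-then-sum over words, scoring each word by its first character.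
import Mathlib
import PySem

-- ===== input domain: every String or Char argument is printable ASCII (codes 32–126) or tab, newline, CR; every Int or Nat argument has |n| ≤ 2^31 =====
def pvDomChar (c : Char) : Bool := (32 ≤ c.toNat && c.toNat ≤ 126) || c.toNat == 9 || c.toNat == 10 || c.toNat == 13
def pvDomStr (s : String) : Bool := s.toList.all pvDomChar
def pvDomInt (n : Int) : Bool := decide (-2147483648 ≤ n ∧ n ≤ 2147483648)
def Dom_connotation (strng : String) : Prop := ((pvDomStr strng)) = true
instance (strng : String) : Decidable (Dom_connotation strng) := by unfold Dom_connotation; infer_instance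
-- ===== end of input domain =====

-- B replaces A's per-character state machine (boundary flag) with split()-then-sum over words; objective: simpler.


-- ===== PORT A =====
-- step of A's for-loop over characters (state = (take, sum))
def connAstep (st : Bool × Int) (c : Char) : Bool × Int :=
  if PySem.Chars.isspace c then (true, st.2)
  else if st.1 then (false, st.2 + (if PySem.Chars.lowerChar c < 'n' then 1 else -1))
  else st

def connotation (strng : String) : Bool :=
  decide (0 ≤ (strng.toList.foldl connAstep (true, 0)).2)

-- ===== PORT B =====
-- score of one word: word[0].lower() < "n" (split() yields no empty words, the [] case is unreachable)
def connBval (w : String) : Int :=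
  match w.toList with
  | c :: _ => if PySem.Chars.lowerChar c < 'n' then 1 else -1
  | [] => 0

def connotation_alt (strng : String) : Bool :=
  decide (0 ≤ (PySem.Str.split₀ strng).foldl (fun t w => t + connBval w) 0)

-- ===== PRECONDITION & SPEC =====
def Spec_connotation (strng : String) (out : Bool) : Prop := out = connotation_alt strng
instance (strng : String) (out : Bool) : Decidable (Spec_connotation strng out) := by unfold Spec_connotation; infer_instance

-- ===== CLAIM (what is proved, stated in full; the proofs are below) =====
def Claim_equal_connotation : Prop := ∀ (strng : String), Dom_connotation strng → Spec_connotation strng (connotation strng)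

-- ===== LEMMAS AND PROOFS =====

-- value of a word by its first character (list form)
def pvVal (w : List Char) : Int :=
  match w with
  | c :: _ => if PySem.Chars.lowerChar c < 'n' then 1 else -1
  | [] => 0

-- total score of a word list
def pvS (ws : List (List Char)) : Int := (ws.map pvVal).sum

theorem pvS_reverse (ws : List (List Char)) : pvS ws.reverse = pvS ws := by
  simp [pvS]

theorem pvVal_append_last (xs : List Char) (c : Char) (h : xs ≠ []) :
    pvVal (xs ++ [c]) = pvVal xs := by
  cases xs with
  | nil => exact absurd rfl h
  | cons a t => simp [pvVal]

-- the main invariant: A's character fold vs split₀.go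
theorem pv_main (cs : List Char) :
    (∀ (acc : List (List Char)) (s : Int),
      (cs.foldl connAstep (true, s)).2
        = s - pvS acc.reverse + pvS (PySem.Chars.split₀.go cs [] acc)) ∧
    (∀ (cur : List Char) (acc : List (List Char)) (s : Int), cur ≠ [] →
      (cs.foldl connAstep (false, s)).2
        = s - pvS acc.reverse - pvVal cur.reverse + pvS (PySem.Chars.split₀.go cs cur acc)) := by
  induction cs with
  | nil =>
    constructor
    · intro acc s
      simp [PySem.Chars.split₀.go, pvS_reverse]
    · intro cur acc s h
      simp [PySem.Chars.split₀.go, List.isEmpty_eq_false_iff.2 h, pvS]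
  | cons c rest ih =>
    constructor
    · intro acc s
      by_cases hs : PySem.Chars.isspace c = true
      · rw [show (c :: rest).foldl connAstep (true, s) = rest.foldl connAstep (true, s) by
          simp [connAstep, hs]]
        rw [show PySem.Chars.split₀.go (c :: rest) [] acc = PySem.Chars.split₀.go rest [] acc by
          simp [PySem.Chars.split₀.go, hs]]
        exact ih.1 acc s
      · rw [show (c :: rest).foldl connAstep (true, s)
            = rest.foldl connAstep (false, s + (if PySem.Chars.lowerChar c < 'n' then 1 else -1)) by
          simp [connAstep, hs]]
        rw [ih.2 [c] acc _ (by simp)]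
        simp [PySem.Chars.split₀.go, hs, pvVal]
        ring
    · intro cur acc s h
      by_cases hs : PySem.Chars.isspace c = true
      · rw [show (c :: rest).foldl connAstep (false, s) = rest.foldl connAstep (true, s) by
          simp [connAstep, hs]]
        rw [ih.1 (cur.reverse :: acc) s]
        rw [show PySem.Chars.split₀.go (c :: rest) cur acc
            = PySem.Chars.split₀.go rest [] (cur.reverse :: acc) by
          simp [PySem.Chars.split₀.go, hs, List.isEmpty_eq_false_iff.2 h]]
        simp [pvS]
        ring
      · rw [show (c :: rest).foldl connAstep (false, s) = rest.foldl connAstep (false, s) by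
          simp [connAstep, hs]]
        rw [ih.2 (c :: cur) acc s (by simp)]
        simp only [PySem.Chars.split₀.go, hs, if_false, Bool.false_eq_true]
        rw [List.reverse_cons, pvVal_append_last _ _ (by simpa using h)]

theorem connBval_eq (w : String) : connBval w = pvVal w.toList := rfl

theorem pvB_fold (ws : List String) (t : Int) :
    ws.foldl (fun t w => t + connBval w) t = t + pvS (ws.map String.toList) := by
  induction ws generalizing t with
  | nil => simp [pvS]
  | cons w rest ih =>
    rw [List.foldl_cons, ih, connBval_eq]
    simp [pvS]
    ring

-- ===== VERDICT (by name: the statement is the Claim_ definition above) =====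
theorem connotation_spec : Claim_equal_connotation := by
  intro strng _
  unfold Spec_connotation connotation connotation_alt
  have hA := (pv_main strng.toList).1 [] 0
  have hsplit : (PySem.Str.split₀ strng).map String.toList = PySem.Chars.split₀ strng.toList := by
    simp [PySem.Chars.split₀]
  rw [hA, pvB_fold, hsplit]
  simp [PySem.Chars.split₀, pvS]
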